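-- pv_equiv track=rewrite | github.com/huber-th/AdventOfCode | 2024/day09/day09.py | is_optimized
-- ===== SOURCE A (Python) =====
-- def is_optimized(fs):
--     """
--     Check if the files are continuous without free space
--     """
--     found_file = False
--     for c in reversed(fs):
--         if c != '.':
--             found_file = True
--         else:
--             if found_file:
--                 return False
--     return True
-- ===== SOURCE B (Python) =====
-- def is_optimized(fs):
--     """
--     Check if the files are continuous without free space
--     """
--     k = sum(1 for c in fs if c != '.')
--     return all(fs[i] != '.' for i in range(k))
-- ===== Notes on version B (the rewrite author's own statement) =====
-- stated objective: simpler
-- what changed: Replaces the flag-driven right-to-left early-return scan with counting the file cells k and checking that the first k positions are all non-free (files form a gap-free prefix).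
import Mathlib
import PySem

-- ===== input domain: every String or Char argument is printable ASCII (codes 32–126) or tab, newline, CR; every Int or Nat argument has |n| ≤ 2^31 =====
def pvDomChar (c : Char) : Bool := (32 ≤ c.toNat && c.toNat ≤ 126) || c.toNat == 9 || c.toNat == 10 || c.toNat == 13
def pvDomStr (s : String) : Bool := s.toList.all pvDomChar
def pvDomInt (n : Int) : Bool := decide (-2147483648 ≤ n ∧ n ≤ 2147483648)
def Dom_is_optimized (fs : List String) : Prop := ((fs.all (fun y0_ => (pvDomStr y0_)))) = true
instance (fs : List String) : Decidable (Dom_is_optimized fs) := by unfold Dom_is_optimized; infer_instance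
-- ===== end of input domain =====

-- B counts the file cells and checks the first k positions are all non-free; same values as A everywhere (simpler decomposition, no speed claim).
-- ===== PORT A =====
def is_optimized_go : List String → Bool → Bool
  | [], _ => true
  | c :: rest, found =>
    if c != "." then is_optimized_go rest true
    else if found then false else is_optimized_go rest found

def is_optimized (fs : List String) : Bool := is_optimized_go fs.reverse false

-- ===== PORT B =====
def is_optimized_alt (fs : List String) : Bool :=
  let k := (fs.filter (fun c => c != ".")).length
  (List.range k).all (fun i => fs.getD i "." != ".")

-- ===== PRECONDITION & SPEC =====
def Spec_is_optimized (fs : List String) (out : Bool) : Prop := out = is_optimized_alt fs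
instance (fs : List String) (out : Bool) : Decidable (Spec_is_optimized fs out) := by unfold Spec_is_optimized; infer_instance

-- ===== CLAIM (what is proved, stated in full; the proofs are below) =====
def Claim_equal_is_optimized : Prop := ∀ (fs : List String), Dom_is_optimized fs → Spec_is_optimized fs (is_optimized fs)

-- ===== LEMMAS AND PROOFS =====
-- spec function: non-free prefix, then everything free
def pvS : List String → Bool
  | [] => true
  | c :: rest => if c != "." then pvS rest else rest.all (fun x => x == ".")

theorem pv_go_true (l : List String) : is_optimized_go l true = l.all (fun c => c != ".") := by
  induction l with
  | nil => rfl
  | cons c rest ih =>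
    by_cases h : c = "." <;> simp [is_optimized_go, h, ih]

theorem pvS_append_singleton (m : List String) (c : String) :
    pvS (m ++ [c]) = if c != "." then m.all (fun x => x != ".") else pvS m := by
  induction m with
  | nil => by_cases h : c = "." <;> simp [pvS, h]
  | cons x m' ih =>
    by_cases hc : c = "."
    · subst hc
      by_cases hx : x = "." <;> simp [pvS, hx, List.all_append, ih]
    · by_cases hx : x = "." <;> simp [pvS, hx, hc, List.all_append, ih]

theorem pv_go_reverse (l : List String) : is_optimized_go l.reverse false = pvS l := by
  induction l using List.reverseRecOn with
  | nil => rfl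
  | append_singleton m c ih =>
    rw [List.reverse_append, pvS_append_singleton]
    by_cases hc : c = "." <;>
      simp [is_optimized_go, hc, pv_go_true, ih]

theorem pv_alt_eq_pvS (fs : List String) : is_optimized_alt fs = pvS fs := by
  induction fs with
  | nil => rfl
  | cons c rest ih =>
    by_cases hc : c = "."
    · subst hc
      by_cases h : rest.all (fun x => x == ".") = true
      · have hfil : rest.filter (fun c => c != ".") = [] := by
          rw [List.filter_eq_nil_iff]
          intro a ha
          have := List.all_eq_true.mp h a ha
          simpa using this
      -- k = 0, so the range check is vacuous
        simp [is_optimized_alt, pvS, hfil, h]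
      · have hex : ∃ a ∈ rest, a ≠ "." := by
          by_contra hall
          push Not at hall
          exact h (List.all_eq_true.mpr (fun a ha => by simp [hall a ha]))
        obtain ⟨a, ha, hane⟩ := hex
        have hpos : 0 < (rest.filter (fun c => c != ".")).length :=
          List.length_pos_iff.mpr
            (List.ne_nil_of_mem (List.mem_filter.mpr ⟨ha, by simp [hane]⟩))
        simp only [is_optimized_alt, pvS] at *
        simp [h]
        exact ⟨0, by simpa using hpos, by simp⟩
    · have hk : ((c :: rest).filter (fun x => x != ".")).length
          = (rest.filter (fun x => x != ".")).length + 1 := by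
        simp [hc]
      simp only [is_optimized_alt, pvS] at *
      rw [hk, List.range_succ_eq_map]
      simp only [Function.comp_def, List.all_cons, List.all_map]
      have hcb : (c != ".") = true := by simp [hc]
      simp only [List.getD_cons_zero, List.getD_cons_succ]
      rw [hcb, Bool.true_and]
      exact ih

-- ===== VERDICT (by name: the statement is the Claim_ definition above) =====
theorem is_optimized_spec : Claim_equal_is_optimized := by
  intro fs _
  unfold Spec_is_optimized
  rw [pv_alt_eq_pvS, is_optimized, pv_go_reverse]
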